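-- pv_equiv track=rewrite | github.com/tOtiana23/Information-security | heming_cipher.py | place_data_bits_into_codeword
-- ===== SOURCE A (Python) =====
-- from typing import List, Tuple, Dict, Optional
--
-- def is_power_of_two(x: int) -> bool:
--     return x != 0 and (x & (x - 1)) == 0
--
-- def make_empty_codeword(n: int) -> List[int]:
--     """
--     Return list of length n+1 (1-based indexing, index 0 unused) with zeros.
--     We will use indices 1..n.
--     """
--     return [0] * (n + 1)
--
-- def place_data_bits_into_codeword(data_bits: List[int], n: int) -> List[int]:
--     """
--     Place data bits (list of 0/1) into positions that are NOT powers of two.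
--     data_bits should be length m (<= available positions). We fill in increasing index order:
--     the first bit in data_bits goes to the lowest-numbered data position.
--     Returns codeword list (1-based).
--     """
--     code = make_empty_codeword(n)
--     data_pos = 0
--     for i in range(1, n + 1):
--         if not is_power_of_two(i):
--             if data_pos < len(data_bits):
--                 code[i] = data_bits[data_pos]
--             else:
--                 code[i] = 0
--             data_pos += 1
--     return code
-- ===== SOURCE B (Python) =====
-- def place_data_bits_into_codeword(data_bits, n):
--     """Chunked construction: positions strictly between consecutive powers of two
--     (2^k, 2^(k+1)) are exactly the data positions, so the codeword is built by
--     slicing data_bits (zero-padded) block by block, doubling p each round: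
--     emit a 0 for the power-of-two position p, then the next hi - p data bits,
--     where hi = min(2p - 1, n). No per-index power-of-two test is needed."""
--     if n < 0:
--         return []
--     padded = list(data_bits) + [0] * n   # zeros fill positions once bits run out
--     out = [0]                            # unused index 0
--     idx = 0
--     p = 1
--     while p <= n:
--         hi = min(2 * p - 1, n)
--         out.append(0)                    # position p is a parity (power-of-two) slot
--         out.extend(padded[idx: idx + hi - p])
--         idx += hi - p
--         p *= 2
--     return out
-- ===== Notes on version B (the rewrite author's own statement) =====
-- stated objective: alternative
-- what changed: B replaces A's per-index is_power_of_two test over 1..n by a doubling loop that emits each power-of-two slot as 0 and copies the block of positions strictly between consecutive powers of two as one slice of the zero-padded bit list.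
import Mathlib
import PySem

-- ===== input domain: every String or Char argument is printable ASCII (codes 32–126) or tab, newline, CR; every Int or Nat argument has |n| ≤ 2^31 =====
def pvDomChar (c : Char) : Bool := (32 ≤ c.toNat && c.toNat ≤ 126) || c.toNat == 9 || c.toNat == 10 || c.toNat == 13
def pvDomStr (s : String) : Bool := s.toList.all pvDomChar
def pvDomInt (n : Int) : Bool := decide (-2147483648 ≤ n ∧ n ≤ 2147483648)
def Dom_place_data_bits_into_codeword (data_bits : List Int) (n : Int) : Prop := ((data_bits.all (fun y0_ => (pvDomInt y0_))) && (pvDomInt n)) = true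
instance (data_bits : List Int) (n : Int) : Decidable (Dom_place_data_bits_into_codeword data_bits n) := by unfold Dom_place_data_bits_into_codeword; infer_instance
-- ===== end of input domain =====

-- B builds the codeword block by block between consecutive powers of two (doubling p and
-- slicing the zero-padded bit list), instead of A's per-index power-of-two test; objective: alternative.

-- ===== PORT A =====

-- is_power_of_two(x): x != 0 and (x & (x - 1)) == 0
def pvIsPow2 (x : Int) : Bool := x ≠ 0 && PySem.Int.band x (x - 1) == 0

-- make_empty_codeword(n): [0] * (n + 1)  ([(n+1).toNat] matches Python: [0]*k = [] for k ≤ 0)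
def pvMakeEmptyCodeword (n : Int) : List Int := List.replicate (n + 1).toNat 0

-- loop body of A: state (code, data_pos); code[i] = … is List.set (i ∈ [1,n] is a valid index)
def pvStepA (data_bits : List Int) (st : List Int × Nat) (i : Int) : List Int × Nat :=
  if ¬ pvIsPow2 i then
    (st.1.set i.toNat (if st.2 < data_bits.length then data_bits.getD st.2 0 else 0), st.2 + 1)
  else st

def place_data_bits_into_codeword (data_bits : List Int) (n : Int) : List Int :=
  ((PySem.List.pyRange 1 (n + 1) 1).foldl (pvStepA data_bits) (pvMakeEmptyCodeword n, 0)).1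

-- ===== PORT B =====

-- the while loop of Source B: each round emits 0 (the power-of-two slot p) followed by the slice
-- padded[idx : idx + hi - p] with hi = min(2p - 1, n), then doubles p.
-- The '0 < p' conjunct only makes the recursion well-founded (p starts at 1 and doubles);
-- it is always true on the calls the port makes.
def pvChunksB (padded : List Int) (n : Int) (p idx : Nat) : List Int :=
  if h : 0 < p ∧ (p : Int) ≤ n then
    (0 :: PySem.List.slice padded (some (idx : Int))
        (some ((idx : Int) + (min (2 * (p : Int) - 1) n - (p : Int)))))
      ++ pvChunksB padded n (2 * p) (idx + (min (2 * (p : Int) - 1) n - (p : Int)).toNat)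
  else []
termination_by n.toNat + 1 - p
decreasing_by
  obtain ⟨h1, h2⟩ := h; omega

def place_data_bits_into_codeword_alt (data_bits : List Int) (n : Int) : List Int :=
  if n < 0 then []
  else 0 :: pvChunksB (data_bits ++ List.replicate n.toNat 0) n 1 0

-- ===== PRECONDITION & SPEC =====
def Spec_place_data_bits_into_codeword (data_bits : List Int) (n : Int) (out : List Int) : Prop := out = place_data_bits_into_codeword_alt data_bits n
instance (data_bits : List Int) (n : Int) (out : List Int) : Decidable (Spec_place_data_bits_into_codeword data_bits n out) := by unfold Spec_place_data_bits_into_codeword; infer_instance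

-- ===== CLAIM (what is proved, stated in full; the proofs are below) =====
def Claim_equal_place_data_bits_into_codeword : Prop := ∀ (data_bits : List Int) (n : Int), Dom_place_data_bits_into_codeword data_bits n → Spec_place_data_bits_into_codeword data_bits n (place_data_bits_into_codeword data_bits n)

-- ===== LEMMAS AND PROOFS =====

-- Canonical middle form both ports are reduced to: walk the positions, a data position
-- consumes the head of the remaining bits (0 once exhausted), any other position yields 0.
def pvAltGo : List Int → List Int → List Int
  | [], _ => []
  | i :: rest, bits =>
    if i ≠ 0 ∧ pvIsPow2 i = false then bits.headD 0 :: pvAltGo rest bits.tail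
    else 0 :: pvAltGo rest bits

-- The guarded value A writes is just data_bits.getD data_pos 0 (getD defaults to 0 out of range).
theorem pvStepA_val (bits : List Int) (dp : Nat) :
    (if dp < bits.length then bits.getD dp 0 else 0) = bits.getD dp 0 := by
  split_ifs with h
  · rfl
  · exact (List.getD_eq_default bits 0 (by omega)).symm

-- A-side invariant: folding A's step over the range segment [k, k+m) on a codeword of length
-- k+m whose power-of-two slots (from k on) are 0 yields the kept prefix ++ pvAltGo.
theorem pvMain (bits : List Int) (m : Nat) : ∀ (k : Nat) (code : List Int) (dp : Nat),
    1 ≤ k → code.length = k + m →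
    (∀ j : Nat, k ≤ j → j < k + m → pvIsPow2 (j : Int) = true → code.getD j 0 = 0) →
    ((PySem.List.pyRange (k : Int) ((k : Int) + (m : Int)) 1).foldl (pvStepA bits) (code, dp)).1
      = code.take k ++ pvAltGo (PySem.List.pyRange (k : Int) ((k : Int) + (m : Int)) 1) (bits.drop dp) := by
  induction m with
  | zero =>
    intro k code dp _ hlen _
    rw [PySem.List.pyRange_one_eq_nil (by omega)]
    simp only [List.foldl_nil, pvAltGo, List.append_nil]
    exact (List.take_of_length_le (by omega)).symm
  | succ m ih =>
    intro k code dp hk hlen hz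
    rw [PySem.List.pyRange_one_cons (by push_cast; omega)]
    have hklt : k < code.length := by omega
    by_cases hp : pvIsPow2 (k : Int) = true
    · -- power-of-two position: A skips it, pvAltGo emits 0; code[k] is 0 by hz
      have hfold : pvStepA bits (code, dp) (k : Int) = (code, dp) := by
        simp [pvStepA, hp]
      have hrange : ((k : Int)) + 1 = ((k + 1 : Nat) : Int) := by push_cast; ring
      have hrange2 : (k : Int) + ((m : Nat) + 1 : Nat) = ((k + 1 : Nat) : Int) + (m : Int) := by
        push_cast; ring
      simp only [List.foldl_cons, hfold]
      rw [pvAltGo, if_neg (by simp [hp]), hrange2, hrange]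
      rw [ih (k + 1) code dp (by omega) (by omega)
        (fun j h1 h2 hj => hz j (by omega) (by omega) hj)]
      have : code.take (k + 1) = code.take k ++ [code[k]] := List.take_succ_eq_append_getElem hklt
      have hck : code[k] = (0 : Int) := by
        have := hz k (le_refl k) (by omega) hp
        simpa [List.getD, List.getElem?_eq_getElem hklt] using this
      rw [this, hck, List.append_assoc]
      simp
    · -- data position: A writes bits.getD dp 0 at k, pvAltGo emits the head of the remaining bits
      have hk0 : (k : Int) ≠ 0 := by exact_mod_cast (by omega : (k : Int) ≠ 0)
      have hfold : pvStepA bits (code, dp) (k : Int)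
          = (code.set k (bits.getD dp 0), dp + 1) := by
        simp only [pvStepA, hp, Bool.false_eq_true, not_false_eq_true,
          if_pos, Int.toNat_natCast]
        rw [pvStepA_val]
      have hrange : ((k : Int)) + 1 = ((k + 1 : Nat) : Int) := by push_cast; ring
      have hrange2 : (k : Int) + ((m : Nat) + 1 : Nat) = ((k + 1 : Nat) : Int) + (m : Int) := by
        push_cast; ring
      simp only [List.foldl_cons, hfold]
      rw [pvAltGo, if_pos ⟨hk0, by simpa using hp⟩, hrange2, hrange]
      rw [ih (k + 1) (code.set k (bits.getD dp 0)) (dp + 1) (by omega) (by rw [List.length_set]; omega)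
        (fun j h1 h2 hj => by
          rw [List.getD, List.getElem?_set_ne (by omega)]
          exact hz j (by omega) (by omega) hj)]
      have hset : (code.set k (bits.getD dp 0)).take (k + 1)
          = code.take k ++ [bits.getD dp 0] := by
        rw [List.take_succ_eq_append_getElem (by simpa using hklt)]
        simp [List.take_set, List.set_eq_of_length_le]
      rw [hset, List.tail_drop]
      have hhead : (bits.drop dp).headD 0 = bits.getD dp 0 := by
        simp [List.headD_eq_head?_getD, List.head?_drop, List.getD]
      rw [hhead, List.append_assoc]
      simp

-- 2^k is a power of two in A's bit test
theorem pvPow2_true (k : Nat) : pvIsPow2 ((2 ^ k : Nat) : Int) = true := by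
  have h1 : (1 : Nat) ≤ 2 ^ k := Nat.one_le_two_pow
  have hband : ((2 ^ k : Nat) : Int) - 1 = ((2 ^ k - 1 : Nat) : Int) := by omega
  have hz : (2 ^ k) &&& (2 ^ k - 1) = 0 := by
    apply Nat.eq_of_testBit_eq; intro i
    simp
  rw [pvIsPow2, hband, PySem.Int.band_natCast, hz]
  simp

-- nothing strictly between 2^k and 2^(k+1) is a power of two in A's bit test
theorem pvPow2_false (x : Int) (k : Nat)
    (h1 : ((2 ^ k : Nat) : Int) < x) (h2 : x < ((2 ^ (k + 1) : Nat) : Int)) :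
    pvIsPow2 x = false := by
  have hx0 : 0 < x := lt_trans (by positivity) h1
  set j : Nat := x.toNat with hj
  have hxj : x = (j : Int) := by omega
  have hj1 : 2 ^ k < j := by omega
  have hj2 : j < 2 ^ (k + 1) := by omega
  have hland : j &&& (j - 1) ≠ 0 := by
    intro h
    have hdj : j / 2 ^ k = 1 :=
      Nat.div_eq_of_lt_le (by omega) (by simp [Nat.pow_succ] at hj2 ⊢; omega)
    have hdj1 : (j - 1) / 2 ^ k = 1 :=
      Nat.div_eq_of_lt_le (by omega) (by simp [Nat.pow_succ] at hj2 ⊢; omega)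
    have hbj : j.testBit k = true := by
      rw [Nat.testBit_eq_decide_div_mod_eq, hdj]; simp
    have hbj1 : (j - 1).testBit k = true := by
      rw [Nat.testBit_eq_decide_div_mod_eq, hdj1]; simp
    have := Nat.testBit_land j (j - 1) k
    rw [h, hbj, hbj1, Nat.zero_testBit] at this
    simp at this
  have hsub : (j : Int) - 1 = ((j - 1 : Nat) : Int) := by omega
  rw [pvIsPow2, hxj, hsub, PySem.Int.band_natCast]
  simp [hland]

-- takeD written as take-then-pad
theorem pvTakeD_eq (m : Nat) : ∀ (l : List Int),
    List.takeD m l 0 = l.take m ++ List.replicate (m - l.length) 0 := by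
  induction m with
  | zero => intro l; simp [List.takeD]
  | succ m ih =>
    intro l
    cases l with
    | nil => simp [List.takeD_succ, ih, List.replicate_succ]
    | cons a l => simp [List.takeD_succ, ih]

-- slicing the zero-padded bit list is takeD of the remaining bits
theorem pvSlicePadded (bits : List Int) (m idx len : Nat) (h : idx + len ≤ m) :
    ((bits ++ List.replicate m (0 : Int)).drop idx).take len
      = List.takeD len (bits.drop idx) 0 := by
  rw [List.drop_append, List.drop_replicate, List.take_append, List.take_replicate,
    pvTakeD_eq, List.length_drop]
  have hmin : min (len - (bits.length - idx)) (m - (idx - bits.length))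
      = len - (bits.length - idx) := by omega
  rw [hmin]

-- pvAltGo over a block of data positions is takeD, consuming that many bits
theorem pvAltGo_block (r1 : List Int) : ∀ (r2 bits : List Int),
    (∀ x ∈ r1, x ≠ 0 ∧ pvIsPow2 x = false) →
    pvAltGo (r1 ++ r2) bits
      = List.takeD r1.length bits 0 ++ pvAltGo r2 (bits.drop r1.length) := by
  induction r1 with
  | nil => intro r2 bits _; simp
  | cons x r1 ih =>
    intro r2 bits h
    have hx := h x (by simp)
    rw [List.cons_append, pvAltGo, if_pos hx, ih r2 bits.tail
      (fun y hy => h y (by simp [hy]))]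
    rw [List.length_cons, List.takeD_succ]
    simp [List.headD_eq_head?_getD, ← List.drop_one, List.drop_drop, Nat.add_comm]

-- B-side invariant: the chunked build from p = 2^k equals pvAltGo over the remaining positions
theorem pvChunksEq (bits : List Int) (n : Int) (hn : 0 ≤ n) :
    ∀ (f k idx : Nat), n.toNat + 1 ≤ 2 ^ k + f → idx < 2 ^ k →
    pvChunksB (bits ++ List.replicate n.toNat 0) n (2 ^ k) idx
      = pvAltGo (PySem.List.pyRange ((2 ^ k : Nat) : Int) (n + 1) 1) (bits.drop idx) := by
  intro f
  induction f with
  | zero =>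
    intro k idx hf _
    rw [pvChunksB, dif_neg (by omega), PySem.List.pyRange_one_eq_nil (by omega), pvAltGo]
  | succ f ih =>
    intro k idx hf hidx
    by_cases hpn : ((2 ^ k : Nat) : Int) ≤ n
    · have hp1 : (1 : Nat) ≤ 2 ^ k := Nat.one_le_two_pow
      set p : Int := ((2 ^ k : Nat) : Int) with hpdef
      set hi : Int := min (2 * p - 1) n with hhidef
      have hp_pos : 0 < p := by positivity
      have hhi_ge : p ≤ hi := by omega
      have hhi_le : hi ≤ n := by omega
      set len : Nat := (hi - p).toNat with hlendef
      have hlen_cast : hi - p = (len : Int) := by omega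
      have hppow : pvIsPow2 p = true := by rw [hpdef]; exact pvPow2_true k
      have hpow2 : ((2 ^ (k + 1) : Nat) : Int) = 2 * p := by
        rw [hpdef]; push_cast [Nat.pow_succ]; ring
      have h2n : (2 : Nat) ^ (k + 1) = 2 * 2 ^ k := by rw [Nat.pow_succ]; ring
      have hlenb : (len : Int) ≤ p - 1 := by omega
      have hcond1 : n.toNat + 1 ≤ 2 ^ (k + 1) + f := by omega
      have hcond2 : idx + len < 2 ^ (k + 1) := by omega
      have hidxlen : idx + len ≤ n.toNat := by omega
      -- unfold one round of the chunked build
      rw [pvChunksB, dif_pos ⟨by positivity, hpn⟩]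
      rw [← hpdef, ← hhidef, hlen_cast, PySem.List.slice_natCast_add]
      rw [pvSlicePadded bits n.toNat idx len hidxlen]
      rw [← h2n]
      simp only [Int.toNat_natCast]
      -- split the remaining positions: [p] ++ (p, hi] ++ [hi+1, n]
      rw [PySem.List.pyRange_one_append p (hi + 1) (n + 1) (by omega) (by omega),
        PySem.List.pyRange_one_cons (a := p) (b := hi + 1) (by omega)]
      simp only [List.cons_append]
      rw [pvAltGo, if_neg (by simp [hppow])]
      have hmid : ∀ x ∈ PySem.List.pyRange (p + 1) (hi + 1) 1, x ≠ 0 ∧ pvIsPow2 x = false := by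
        intro x hx
        rw [PySem.List.mem_pyRange_one] at hx
        refine ⟨by omega, pvPow2_false x k (by omega) (by omega)⟩
      rw [pvAltGo_block _ _ _ hmid]
      have hmidlen : (PySem.List.pyRange (p + 1) (hi + 1) 1).length = len := by
        rw [PySem.List.length_pyRange_one]; omega
      rw [hmidlen, List.drop_drop]
      -- now reduce the recursive call with the induction hypothesis
      rw [ih (k + 1) (idx + len) hcond1 hcond2]
      -- the tail ranges agree: both are [hi+1, n] = [2^(k+1), n] (empty when hi = n)
      by_cases hcase : 2 * p - 1 ≤ n
      · rw [show ((2 ^ (k + 1) : Nat) : Int) = hi + 1 by omega]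
      · rw [PySem.List.pyRange_one_eq_nil (a := hi + 1) (by omega),
          PySem.List.pyRange_one_eq_nil (a := ((2 ^ (k + 1) : Nat) : Int)) (by omega)]
    · rw [pvChunksB, dif_neg (by omega), PySem.List.pyRange_one_eq_nil (by omega), pvAltGo]

-- ===== VERDICT (by name: the statement is the Claim_ definition above) =====
theorem place_data_bits_into_codeword_spec : Claim_equal_place_data_bits_into_codeword := by
  intro bits n _
  unfold Spec_place_data_bits_into_codeword place_data_bits_into_codeword
    place_data_bits_into_codeword_alt pvMakeEmptyCodeword
  by_cases hn : n < 0
  · rw [if_pos hn, PySem.List.pyRange_one_eq_nil (by omega)]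
    simp [Int.toNat_of_nonpos (by omega : n + 1 ≤ 0)]
  · push Not at hn
    rw [if_neg (by omega)]
    -- A's fold over range(1, n+1) via the invariant, starting from the all-zero codeword
    have hcast : (1 : Int) + (n.toNat : Int) = n + 1 := by omega
    have hmain := pvMain bits n.toNat 1 (List.replicate (1 + n.toNat) 0) 0 (le_refl 1) (by simp)
      (fun j _ _ _ => by simp)
    push_cast at hmain
    rw [hcast] at hmain
    have hlen : (n + 1).toNat = 1 + n.toNat := by omega
    rw [hlen, hmain]
    have htake : (List.replicate (1 + n.toNat) (0 : Int)).take 1 = [0] := by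
      rw [Nat.add_comm]; simp [List.take_replicate]
    rw [htake]
    -- B's chunked build via its invariant, from p = 1 = 2^0, idx = 0
    have hchunks := pvChunksEq bits n hn (n.toNat + 1) 0 0 (by omega) (by omega)
    simp only [pow_zero, Nat.cast_one, List.drop_zero] at hchunks
    rw [hchunks]
    simp
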